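-- pv_equiv track=rewrite | github.com/e-kohlm/Bachelor-Thesis | scripts/VUDENC/utils.py | removeDoubleSeperators
-- ===== SOURCE A (Python) =====
-- def removeDoubleSeperators(tokenlist):
--     last = ""
--     newtokens = []
--     for token in tokenlist:
--         if token == "\n":
--             token = " "
--         if len(token) > 0:
--             if ((last == " ") and (token == " ")):
--                 o = 1 #noop
--             else:
--                 newtokens.append(token)
--
--             last = token
--
--     return(newtokens)
-- ===== SOURCE B (Python) =====
-- from itertools import groupby
--
-- def removeDoubleSeperators(tokenlist):
--     # normalize: drop empty tokens, turn "\n" into " "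
--     norm = [" " if t == "\n" else t for t in tokenlist if t]
--     out = []
--     for is_space, group in groupby(norm, key=lambda x: x == " "):
--         if is_space:
--             out.append(" ")
--         else:
--             out.extend(group)
--     return out
-- ===== Notes on version B (the rewrite author's own statement) =====
-- stated objective: idiomatic
-- what changed: Replaces the single stateful scan with a `last` flag by a filter-and-normalize comprehension followed by itertools.groupby, which collapses each run of spaces to one token.
import Mathlib
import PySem

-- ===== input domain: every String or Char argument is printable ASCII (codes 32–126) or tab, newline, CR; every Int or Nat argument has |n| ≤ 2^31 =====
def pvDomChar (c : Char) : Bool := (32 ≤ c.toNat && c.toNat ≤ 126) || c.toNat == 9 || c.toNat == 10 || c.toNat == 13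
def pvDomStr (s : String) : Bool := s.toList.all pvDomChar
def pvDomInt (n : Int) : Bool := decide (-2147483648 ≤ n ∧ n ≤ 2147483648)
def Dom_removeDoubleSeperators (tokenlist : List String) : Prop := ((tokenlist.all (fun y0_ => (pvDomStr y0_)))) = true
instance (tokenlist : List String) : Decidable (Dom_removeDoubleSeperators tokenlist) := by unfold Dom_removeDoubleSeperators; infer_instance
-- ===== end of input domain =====

-- B replaces A's stateful `last`-flag scan by a filter/normalize pass followed by a groupby-style
-- collapse of space runs (objective: idiomatic; same return value, no speed claim).

-- ===== PORT A =====
-- Port of A: one pass with `last` and an accumulator, literal transliteration of the loop.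
def goA_removeDoubleSeperators (last : String) (newtokens : List String) : List String → List String
  | [] => newtokens
  | token :: rest =>
    let token := if token = "\n" then " " else token
    if PySem.Str.len token > 0 then
      if last = " " ∧ token = " " then
        goA_removeDoubleSeperators token newtokens rest
      else
        goA_removeDoubleSeperators token (newtokens ++ [token]) rest
    else
      goA_removeDoubleSeperators last newtokens rest

def removeDoubleSeperators (tokenlist : List String) : List String :=
  goA_removeDoubleSeperators "" [] tokenlist

-- ===== PORT B =====
-- Port of B: normalize (filter empties, map newline to space), then group: each run of spaces
-- becomes a single " ", other groups are emitted as-is (the groupby pass of Source B).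
def normB_removeDoubleSeperators (tokenlist : List String) : List String :=
  (tokenlist.filter (fun t => t ≠ "")).map (fun t => if t = "\n" then " " else t)

def dropSpacesB : List String → List String
  | [] => []
  | t :: rest => if t = " " then dropSpacesB rest else t :: rest

lemma dropSpacesB_length_le (l : List String) : (dropSpacesB l).length ≤ l.length := by
  induction l with
  | nil => simp [dropSpacesB]
  | cons x xs ih => by_cases hx : x = " " <;> simp [dropSpacesB, hx]; omega

def collapseB : List String → List String
  | [] => []
  | t :: rest =>
    if t = " " then " " :: collapseB (dropSpacesB rest)
    else t :: collapseB rest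
termination_by l => l.length
decreasing_by
  · exact Nat.lt_succ_of_le (dropSpacesB_length_le rest)
  · simp

def removeDoubleSeperators_alt (tokenlist : List String) : List String :=
  collapseB (normB_removeDoubleSeperators tokenlist)

-- ===== PRECONDITION & SPEC =====
def Spec_removeDoubleSeperators (tokenlist : List String) (out : List String) : Prop := out = removeDoubleSeperators_alt tokenlist
instance (tokenlist : List String) (out : List String) : Decidable (Spec_removeDoubleSeperators tokenlist out) := by unfold Spec_removeDoubleSeperators; infer_instance

-- ===== CLAIM (what is proved, stated in full; the proofs are below) =====
def Claim_equal_removeDoubleSeperators : Prop := ∀ (tokenlist : List String), Dom_removeDoubleSeperators tokenlist → Spec_removeDoubleSeperators tokenlist (removeDoubleSeperators tokenlist)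

-- ===== LEMMAS AND PROOFS =====

lemma len_pos_iff (s : String) : PySem.Str.len s > 0 ↔ s ≠ "" := by
  rw [PySem.Str.len_eq, Ne, ← String.toList_eq_nil_iff]
  cases s.toList <;> simp

lemma goA_eq (l : List String) : ∀ (last : String) (acc : List String),
    goA_removeDoubleSeperators last acc l =
      acc ++ (if last = " " then collapseB (dropSpacesB (normB_removeDoubleSeperators l))
              else collapseB (normB_removeDoubleSeperators l)) := by
  induction l with
  | nil =>
    intro last acc
    by_cases h : last = " " <;>
      simp [goA_removeDoubleSeperators, normB_removeDoubleSeperators, collapseB, dropSpacesB, h]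
  | cons token rest ih =>
    intro last acc
    by_cases he : token = ""
    · subst he
      have hnorm : normB_removeDoubleSeperators ("" :: rest) = normB_removeDoubleSeperators rest := by
        simp [normB_removeDoubleSeperators]
      have hstep : goA_removeDoubleSeperators last acc ("" :: rest)
          = goA_removeDoubleSeperators last acc rest := by
        simp [goA_removeDoubleSeperators]
      rw [hstep, ih, hnorm]
    · have htne : (if token = "\n" then " " else token) ≠ "" := by
        by_cases hn : token = "\n" <;> simp [hn, he]
      have hlen : PySem.Str.len (if token = "\n" then " " else token) > 0 :=
        (len_pos_iff _).mpr htne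
      have hnorm : normB_removeDoubleSeperators (token :: rest)
          = (if token = "\n" then " " else token) :: normB_removeDoubleSeperators rest := by
        simp [normB_removeDoubleSeperators, he]
      set t := if token = "\n" then " " else token with ht
      by_cases hts : t = " " <;> by_cases hl : last = " "
      · -- last = " ", t = " ": token skipped, space run continues
        have hstep : goA_removeDoubleSeperators last acc (token :: rest)
            = goA_removeDoubleSeperators t acc rest := by
          simp [goA_removeDoubleSeperators, ← ht, hl, hts]
        rw [hstep, ih, hnorm]
        simp [hl, hts, dropSpacesB]
      · -- last ≠ " ", t = " ": emit one space, then in space state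
        have hstep : goA_removeDoubleSeperators last acc (token :: rest)
            = goA_removeDoubleSeperators t (acc ++ [t]) rest := by
          simp [goA_removeDoubleSeperators, ← ht, hl]
          exact fun h => absurd h htne
        rw [hstep, ih, hnorm]
        simp [hl, hts, collapseB]
      · -- last = " ", t ≠ " ": emit t, leave space state
        have hstep : goA_removeDoubleSeperators last acc (token :: rest)
            = goA_removeDoubleSeperators t (acc ++ [t]) rest := by
          simp [goA_removeDoubleSeperators, ← ht, hts]
          exact fun h => absurd h htne
        rw [hstep, ih, hnorm]
        simp [hl, hts, collapseB, dropSpacesB]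
      · -- last ≠ " ", t ≠ " ": emit t
        have hstep : goA_removeDoubleSeperators last acc (token :: rest)
            = goA_removeDoubleSeperators t (acc ++ [t]) rest := by
          simp [goA_removeDoubleSeperators, ← ht, hts]
          exact fun h => absurd h htne
        rw [hstep, ih, hnorm]
        simp [hl, hts, collapseB]

-- ===== VERDICT (by name: the statement is the Claim_ definition above) =====
theorem removeDoubleSeperators_spec : Claim_equal_removeDoubleSeperators := by
  intro tokenlist _
  unfold Spec_removeDoubleSeperators removeDoubleSeperators removeDoubleSeperators_alt
  simpa using goA_eq tokenlist "" []
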